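-- pv_equiv track=rewrite | github.com/MoraruGeorge32/PythonLabs | Lab2.py | tuplePalindrome
-- ===== SOURCE A (Python) =====
-- def palindrome(x):
--     return str(x) == str(x)[::-1]
--
-- def tuplePalindrome(list):
--     res = [0,0]
--     for element in list:
--         if palindrome(element):
--             res[0] = res[0] + 1
--             if (element>res[1]):
--                 res[1] = element
--     return tuple(res)
-- ===== SOURCE B (Python) =====
-- def tuplePalindrome(list):
--     # arithmetic palindrome test: reverse the decimal digits numerically, no strings
--     count = 0
--     best = 0
--     for x in list:
--         if x >= 0:
--             rev, t = 0, x
--             while t > 0: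
--                 rev = rev * 10 + t % 10
--                 t //= 10
--             if rev == x:
--                 count = count + 1
--                 if x > best:
--                     best = x
--     return (count, best)
-- ===== Notes on version B (the rewrite author's own statement) =====
-- stated objective: alternative
-- what changed: Replaces the string-based palindrome test (str(x) == str(x)[::-1]) with a purely arithmetic one: negatives are never palindromes, and for x >= 0 the decimal digits are reversed numerically with % 10 and // 10 and compared to x; no string is ever built.
import Mathlib
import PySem

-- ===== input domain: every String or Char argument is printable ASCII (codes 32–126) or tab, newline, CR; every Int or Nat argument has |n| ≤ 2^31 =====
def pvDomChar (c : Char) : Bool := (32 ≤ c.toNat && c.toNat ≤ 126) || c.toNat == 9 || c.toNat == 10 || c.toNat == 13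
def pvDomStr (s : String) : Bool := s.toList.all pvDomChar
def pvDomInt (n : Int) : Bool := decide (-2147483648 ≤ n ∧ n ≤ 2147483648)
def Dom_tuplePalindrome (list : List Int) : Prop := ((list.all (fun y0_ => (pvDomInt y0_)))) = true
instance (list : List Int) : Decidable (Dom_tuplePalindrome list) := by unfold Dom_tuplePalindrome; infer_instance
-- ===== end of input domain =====

-- B replaces A's string-based palindrome test with a purely arithmetic digit-reversal test; same cost, no behaviour change.

-- ===== PORT A =====
-- palindrome(x): str(x) == str(x)[::-1]; str(x)[::-1] via PySem.Str.slice?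
def pyPalindrome (x : Int) : Bool :=
  some (PySem.Int.toStr x) == PySem.Str.slice? (PySem.Int.toStr x) none none (-1)

def tuplePalindrome (list : List Int) : Int × Int :=
  list.foldl (fun res e =>
    if pyPalindrome e then (res.1 + 1, if e > res.2 then e else res.2) else res) (0, 0)

-- ===== PORT B =====
-- the 'while t > 0: rev = rev*10 + t%10; t //= 10' loop of Source B
def revLoop (t rev : Int) : Int :=
  if h : 0 < t then
    revLoop (PySem.Int.floordiv t 10) (rev * 10 + PySem.Int.mod t 10)
  else rev
termination_by t.toNat
decreasing_by
  rw [PySem.Int.floordiv_eq_ediv_of_pos (by norm_num : (0:Int) < 10)]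
  omega

def tuplePalindrome_alt (list : List Int) : Int × Int :=
  list.foldl (fun res x =>
    if 0 ≤ x then
      let rev := revLoop x 0
      if rev == x then (res.1 + 1, if x > res.2 then x else res.2) else res
    else res) (0, 0)

-- ===== PRECONDITION & SPEC =====
def Spec_tuplePalindrome (list : List Int) (out : Int × Int) : Prop := out = tuplePalindrome_alt list
instance (list : List Int) (out : Int × Int) : Decidable (Spec_tuplePalindrome list out) := by unfold Spec_tuplePalindrome; infer_instance

-- ===== CLAIM =====
def Claim_equal_tuplePalindrome : Prop := ∀ (list : List Int), Dom_tuplePalindrome list → Spec_tuplePalindrome list (tuplePalindrome list)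

-- ===== LEMMAS AND PROOFS =====
lemma pyPalindrome_chars (x : Int) :
    pyPalindrome x = decide (PySem.Int.toChars x = (PySem.Int.toChars x).reverse) := by
  have h : PySem.Int.toStr x = String.ofList (PySem.Int.toChars x) := rfl
  rw [pyPalindrome, h]
  simp [pysem, Bool.beq_eq_decide_eq, String.ofList_inj]
lemma toDigitsCore_eq (fuel : Nat) : ∀ (n : Nat) (ds : List Char), n < fuel → 0 < n →
    Nat.toDigitsCore 10 fuel n ds = ((Nat.digits 10 n).map Nat.digitChar).reverse ++ ds := by
  induction fuel with
  | zero => intro n ds h; omega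
  | succ fuel ih =>
    intro n ds h hn
    rw [Nat.toDigitsCore]
    rw [Nat.digits_def' (by norm_num) hn]
    by_cases h0 : n / 10 = 0
    · simp [h0, Nat.digits_zero]
    · simp only [h0, if_false]
      rw [ih (n / 10) _ (by omega) (by omega)]
      simp
lemma toDigits_eq (n : Nat) (hn : 0 < n) :
    Nat.toDigits 10 n = ((Nat.digits 10 n).map Nat.digitChar).reverse := by
  rw [Nat.toDigits, toDigitsCore_eq (n + 1) n [] (by omega) hn, List.append_nil]
lemma pyPalindrome_neg (x : Int) (hx : x < 0) : pyPalindrome x = false := by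
  rw [pyPalindrome_chars]
  simp only [decide_eq_false_iff_not]
  intro h
  have hp : 0 < x.natAbs := by omega
  rw [PySem.Int.toChars, if_pos hx, toDigits_eq _ hp] at h
  rcases hd : Nat.digits 10 x.natAbs with _ | ⟨d, rest⟩
  · rw [Nat.digits_eq_nil_iff_eq_zero] at hd; omega
  · rw [hd] at h
    simp only [List.map_cons, List.reverse_cons, List.reverse_append, List.reverse_reverse] at h
    have hhead : '-' = Nat.digitChar d := by
      have := congrArg (fun l => l.head?) h
      simpa using this
    have hdlt : d < 10 := Nat.digits_lt_base (by norm_num) (by rw [hd]; exact List.mem_cons_self ..)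
    interval_cases d <;> simp_all [Nat.digitChar]

lemma digitChar_inj {a b : Nat} (ha : a < 10) (hb : b < 10) (h : Nat.digitChar a = Nat.digitChar b) : a = b := by
  interval_cases a <;> interval_cases b <;> simp_all [Nat.digitChar]
lemma map_digitChar_inj : ∀ (l1 l2 : List Nat), (∀ d ∈ l1, d < 10) → (∀ d ∈ l2, d < 10) →
    l1.map Nat.digitChar = l2.map Nat.digitChar → l1 = l2 := by
  intro l1
  induction l1 with
  | nil => intro l2 _ _ h; cases l2 <;> simp_all
  | cons a t ih =>
    intro l2 h1 h2 h
    cases l2 with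
    | nil => simp_all
    | cons b t2 =>
      simp only [List.map_cons, List.cons.injEq] at h
      have hab : a = b := digitChar_inj (h1 a (by simp)) (h2 b (by simp)) h.1
      have := ih t2 (fun d hd => h1 d (by simp [hd])) (fun d hd => h2 d (by simp [hd])) h.2
      simp_all
lemma ofDigits_inj : ∀ (l1 l2 : List Nat), l1.length = l2.length → (∀ d ∈ l1, d < 10) → (∀ d ∈ l2, d < 10) →
    Nat.ofDigits 10 l1 = Nat.ofDigits 10 l2 → l1 = l2 := by
  intro l1
  induction l1 with
  | nil => intro l2 hl _ _ _; cases l2 <;> simp_all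
  | cons a t ih =>
    intro l2 hl h1 h2 h
    cases l2 with
    | nil => simp_all
    | cons b t2 =>
      rw [Nat.ofDigits_cons, Nat.ofDigits_cons] at h
      have ha := h1 a (by simp)
      have hb := h2 b (by simp)
      have hab : a = b ∧ Nat.ofDigits 10 t = Nat.ofDigits 10 t2 := by constructor <;> omega
      have := ih t2 (by simpa using hl) (fun d hd => h1 d (by simp [hd])) (fun d hd => h2 d (by simp [hd])) hab.2
      simp_all [hab.1]
lemma revLoop_nat (t : Nat) : ∀ (acc : Nat),
    revLoop (t : Int) (acc : Int) =
      ((acc * 10 ^ (Nat.digits 10 t).length + Nat.ofDigits 10 (Nat.digits 10 t).reverse : Nat) : Int) := by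
  induction t using Nat.strong_induction_on with
  | _ t ih =>
    intro acc
    rw [revLoop]
    by_cases ht : 0 < t
    · rw [dif_pos (by exact_mod_cast ht)]
      have hdiv : PySem.Int.floordiv (t : Int) (10 : Int) = ((t / 10 : Nat) : Int) := by
        exact_mod_cast PySem.Int.floordiv_natCast t 10
      have hmod : PySem.Int.mod (t : Int) (10 : Int) = ((t % 10 : Nat) : Int) := by
        exact_mod_cast PySem.Int.mod_natCast t 10
      rw [hdiv, hmod]
      have hcast : (acc : Int) * 10 + ((t % 10 : Nat) : Int) = ((acc * 10 + t % 10 : Nat) : Int) := by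
        push_cast; ring
      rw [hcast, ih (t / 10) (Nat.div_lt_self ht (by norm_num)) (acc * 10 + t % 10)]
      rw [Nat.digits_def' (by norm_num) ht]
      congr 1
      simp only [List.reverse_cons, List.length_cons, Nat.ofDigits_append, List.length_reverse]
      have h1 : Nat.ofDigits 10 [t % 10] = t % 10 := by simp [Nat.ofDigits]
      rw [h1]
      ring
    · have ht0 : t = 0 := by omega
      subst ht0
      rw [dif_neg (by norm_num)]
      simp
lemma revLoop_zero_eq (n : Nat) :
    (revLoop (n : Int) 0 = (n : Int)) ↔ Nat.ofDigits 10 (Nat.digits 10 n).reverse = n := by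
  rw [(by norm_num : (0:Int) = ((0:Nat):Int)), revLoop_nat, Int.natCast_inj]
  omega
lemma digits_palindrome_iff (n : Nat) :
    (Nat.digits 10 n).reverse = Nat.digits 10 n ↔ Nat.ofDigits 10 (Nat.digits 10 n).reverse = n := by
  constructor
  · intro h; rw [h, Nat.ofDigits_digits]
  · intro h
    apply ofDigits_inj
    · simp
    · intro d hd; exact Nat.digits_lt_base (by norm_num) (List.mem_reverse.mp hd)
    · intro d hd; exact Nat.digits_lt_base (by norm_num) hd
    · rw [h, Nat.ofDigits_digits]
lemma pyPalindrome_nonneg (x : Int) (hx : 0 ≤ x) :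
    pyPalindrome x = decide (revLoop x 0 = x) := by
  obtain ⟨n, rfl⟩ : ∃ n : Nat, x = (n : Int) := ⟨x.toNat, by omega⟩
  rw [pyPalindrome_chars]
  have hchars : PySem.Int.toChars (n : Int) = Nat.toDigits 10 n := by
    rw [PySem.Int.toChars, if_neg (by omega)]
    simp
  rw [hchars]
  by_cases hn : 0 < n
  · rw [toDigits_eq n hn]
    simp only [decide_eq_decide]
    rw [List.reverse_reverse, revLoop_zero_eq n, ← digits_palindrome_iff n, ← List.map_reverse]
    constructor
    · intro h
      exact map_digitChar_inj (Nat.digits 10 n).reverse (Nat.digits 10 n)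
        (fun d hd => Nat.digits_lt_base (by norm_num) (List.mem_reverse.mp hd))
        (fun d hd => Nat.digits_lt_base (by norm_num) hd) h
    · intro h; rw [h]
  · have hn0 : n = 0 := by omega
    subst hn0
    rw [revLoop]
    norm_num [Nat.toDigits, Nat.toDigitsCore]

-- the two foldl step functions agree pointwise
lemma step_eq : (fun (res : Int × Int) e =>
      if pyPalindrome e then (res.1 + 1, if e > res.2 then e else res.2) else res)
    = (fun (res : Int × Int) x =>
      if 0 ≤ x then
        let rev := revLoop x 0
        if rev == x then (res.1 + 1, if x > res.2 then x else res.2) else res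
      else res) := by
  funext res x
  by_cases hx : 0 ≤ x
  · rw [pyPalindrome_nonneg x hx]
    simp only [hx, if_true, beq_iff_eq]
    by_cases hr : revLoop x 0 = x <;> simp [hr]
  · rw [pyPalindrome_neg x (by omega)]
    simp [hx]

-- ===== VERDICT =====
theorem tuplePalindrome_spec : Claim_equal_tuplePalindrome := by
  intro list _
  show _ = _
  rw [tuplePalindrome, tuplePalindrome_alt, step_eq]
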